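-- pv_equiv track=rewrite | github.com/KDot227/Batch-Somali-Obfuscator | main.py | obf_oneline
-- ===== SOURCE A (Python) =====
-- def obf_oneline(line):
--     final_string = ""
--     for word in line.split(" "):
--         if word.startswith("%"):
--             final_string += word + " "
--             continue
--         if word.find("%~") != -1:
--             final_string += word + " "
--             continue
--         else:
--             for char in word:
--                 public = r"C:\Users\Public"
--                 weird = r"C:\Program Files (x86)\Common Files"
--                 program_1 = r"C:\Program Files"
--                 program_2 = r"C:\Program Files (x86)"
--                 psmodule_path = r"%ProgramFiles%\WindowsPowerShell\Modules;C:\WINDOWS\system32\WindowsPowerShell\v1.0\Modules"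
--                 if char in program_1:
--                     final_string += f"%programfiles:~{program_1.index(char)},1%"
--                 elif char in program_2:
--                     final_string += (
--                         f"%programfiles(x86):~{program_2.index(char)},1%"
--                     )
--                 elif char in public:
--                     final_string += f"%public:~{public.index(char)},1%"
--                 elif char in weird:
--                     final_string += (
--                         f"%CommonProgramFiles(x86):~{weird.index(char)},1%"
--                     )
--                 elif char in psmodule_path:
--                     new = psmodule_path.index(char)
--                     # Why do we have to add 2? I have no fucking idea lmao
--                     final_string += f"%PSModulePath:~{new + 2},1%"
--                 else:
--                     final_string += char
--             final_string += " "
--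
--     return final_string
-- ===== SOURCE B (Python) =====
-- def _build_table():
--     sources = [
--         ("programfiles", r"C:\Program Files", 0),
--         ("programfiles(x86)", r"C:\Program Files (x86)", 0),
--         ("public", r"C:\Users\Public", 0),
--         ("CommonProgramFiles(x86)", r"C:\Program Files (x86)\Common Files", 0),
--         ("PSModulePath", r"%ProgramFiles%\WindowsPowerShell\Modules;C:\WINDOWS\system32\WindowsPowerShell\v1.0\Modules", 2),
--     ]
--     table = {}
--     for ch in set("".join(src for _, src, _ in sources)):
--         for name, src, off in sources:
--             i = src.find(ch)
--             if i >= 0: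
--                 table[ord(ch)] = f"%{name}:~{i + off},1%"
--                 break
--     return table
--
-- _TABLE = _build_table()
--
-- def obf_oneline(line):
--     # scan the line in place, peeling one word at a time with find(" ", pos)
--     # instead of splitting it all up front; str.translate obfuscates a whole
--     # word in one call against a table built once
--     out = []
--     pos = 0
--     while True:
--         i = line.find(" ", pos)
--         word = line[pos:] if i < 0 else line[pos:i]
--         out.append(word if (word.startswith("%") or "%~" in word) else word.translate(_TABLE))
--         out.append(" ")
--         if i < 0:
--             return "".join(out)
--         pos = i + 1
-- ===== Notes on version B (the rewrite author's own statement) =====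
-- stated objective: faster
-- what changed: B replaces A's split-then-nested-loops design by a single in-place scan that peels one word at a time with str.find from the current position (no up-front split) and obfuscates each eligible word with one str.translate call against a char table built once, instead of A's per-character five-branch membership/index chain over the constant strings.
import Mathlib
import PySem

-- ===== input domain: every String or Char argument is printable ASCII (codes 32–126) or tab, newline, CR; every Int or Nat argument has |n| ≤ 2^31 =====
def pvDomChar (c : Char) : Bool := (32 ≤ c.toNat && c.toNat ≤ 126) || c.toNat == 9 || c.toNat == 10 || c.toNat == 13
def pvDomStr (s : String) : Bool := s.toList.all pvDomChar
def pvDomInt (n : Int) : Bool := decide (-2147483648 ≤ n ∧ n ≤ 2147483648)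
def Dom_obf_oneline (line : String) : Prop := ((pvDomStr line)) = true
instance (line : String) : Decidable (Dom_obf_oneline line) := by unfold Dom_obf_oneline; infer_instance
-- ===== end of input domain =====

-- B scans the line in place (find(" ", pos) peels one word at a time, no up-front split)
-- and obfuscates each word in one translate call against a char table built once;
-- objective: a single in-place scan with a one-time table instead of split + nested membership chains (measured faster by a constant factor).

-- ===== PORT A =====
-- A's inner per-character if/elif chain ('.index(char)' after an 'in' guard is the
-- first-occurrence index, which is PySem.Chars.find here — exact since the guard holds).
def obfCharA (char : Char) : String :=
  let publicS := "C:\\Users\\Public"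
  let weird := "C:\\Program Files (x86)\\Common Files"
  let program_1 := "C:\\Program Files"
  let program_2 := "C:\\Program Files (x86)"
  let psmodule_path := "%ProgramFiles%\\WindowsPowerShell\\Modules;C:\\WINDOWS\\system32\\WindowsPowerShell\\v1.0\\Modules"
  if PySem.Chars.isIn [char] program_1.toList then
    "%programfiles:~" ++ PySem.Int.toStr (PySem.Chars.find program_1.toList [char]) ++ ",1%"
  else if PySem.Chars.isIn [char] program_2.toList then
    "%programfiles(x86):~" ++ PySem.Int.toStr (PySem.Chars.find program_2.toList [char]) ++ ",1%"
  else if PySem.Chars.isIn [char] publicS.toList then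
    "%public:~" ++ PySem.Int.toStr (PySem.Chars.find publicS.toList [char]) ++ ",1%"
  else if PySem.Chars.isIn [char] weird.toList then
    "%CommonProgramFiles(x86):~" ++ PySem.Int.toStr (PySem.Chars.find weird.toList [char]) ++ ",1%"
  else if PySem.Chars.isIn [char] psmodule_path.toList then
    "%PSModulePath:~" ++ PySem.Int.toStr (PySem.Chars.find psmodule_path.toList [char] + 2) ++ ",1%"
  else String.singleton char

def obf_oneline (line : String) : String :=
  (PySem.Chars.splitOn line.toList " ".toList).foldl (fun final_string word =>
    if PySem.Chars.startswith word "%".toList then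
      final_string ++ String.ofList word ++ " "
    else if PySem.Chars.find word "%~".toList != -1 then
      final_string ++ String.ofList word ++ " "
    else
      (word.foldl (fun fs char => fs ++ obfCharA char) final_string) ++ " ") ""

-- ===== PORT B =====
-- the five source strings with env-var name and index offset, priority order (Source B 'sources')
def pvSources : List (String × String × Int) :=
  [("programfiles", "C:\\Program Files", 0),
   ("programfiles(x86)", "C:\\Program Files (x86)", 0),
   ("public", "C:\\Users\\Public", 0),
   ("CommonProgramFiles(x86)", "C:\\Program Files (x86)\\Common Files", 0),
   ("PSModulePath", "%ProgramFiles%\\WindowsPowerShell\\Modules;C:\\WINDOWS\\system32\\WindowsPowerShell\\v1.0\\Modules", 2)]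

-- Source B's inner 'for … if i >= 0: …; break' over sources = first matching source
def pvRepl : List (String × String × Int) → Char → Option String
  | [], _ => none
  | (name, src, off) :: rest, ch =>
      let i := PySem.Chars.find src.toList [ch]
      if 0 ≤ i then some ("%" ++ name ++ ":~" ++ PySem.Int.toStr (i + off) ++ ",1%")
      else pvRepl rest ch

-- set("".join(src for …)): the distinct source characters (first-insertion order)
def pvAllChars : PySem.Set Char := PySem.Set.ofList (pvSources.flatMap (fun s => s.2.1.toList))

-- the translate table, keyed by ord(ch) as in Source B
def pvTable : PySem.Dict Int String :=
  pvAllChars.foldl (fun t ch =>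
    match pvRepl pvSources ch with
    | some s => t.insert (ch.toNat : Int) s
    | none => t) PySem.Dict.empty

-- str.translate maps each char through the table (absent → unchanged); exact port by hand
def pvLookup (c : Char) : String := (pvTable.get? (c.toNat : Int)).getD (String.singleton c)

def pvTranslate (w : List Char) : String := w.foldl (fun s c => s ++ pvLookup c) ""

-- one peeled word, obfuscated or kept verbatim
def pvPiece (word : List Char) : String :=
  if PySem.Chars.startswith word "%".toList || PySem.Chars.isIn "%~".toList word then
    String.ofList word
  else pvTranslate word

-- needed by pvGo's decreasing_by: a found index lies in [pos, line.length)
lemma pv_findFrom_bounds (l : List Char) (pos : Nat)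
    (h : ¬ PySem.Chars.findFrom l [' '] (pos : Int) none < 0) :
    pos ≤ (PySem.Chars.findFrom l [' '] (pos : Int) none).toNat ∧
      (PySem.Chars.findFrom l [' '] (pos : Int) none).toNat < l.length := by
  have hk : pos ≤ l.length := by
    by_contra hgt
    apply h
    simp only [PySem.Chars.findFrom]
    have h1 : ¬ ((pos : Int) < 0) := by omega
    have h2 : (l.length : Int) < (pos : Int) := by exact_mod_cast Nat.lt_of_not_le hgt
    simp [h1, h2]
  have hne : PySem.Chars.findFrom l [' '] (pos : Int) none ≠ -1 := by
    intro he; rw [he] at h; exact h (by norm_num)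
  obtain ⟨hle, hpref, -⟩ := PySem.Chars.findFrom_natCast_spec l [' '] pos hk hne
  have h0 : 0 ≤ PySem.Chars.findFrom l [' '] (pos : Int) none := not_lt.mp h
  constructor
  · omega
  · have hlen := hpref.length_le
    simp only [List.length_cons, List.length_nil, List.length_drop] at hlen
    omega

-- Source B's while loop: peel the word at pos, append its piece and " ", continue past the space
def pvGo (line : List Char) (pos : Nat) (out : List String) : List String :=
  let i := PySem.Chars.findFrom line [' '] (pos : Int) none
  let word := if i < 0 then PySem.List.slice line (some (pos : Int)) none
              else PySem.List.slice line (some (pos : Int)) (some i)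
  if h : i < 0 then out ++ [pvPiece word, " "]
  else pvGo line (i.toNat + 1) (out ++ [pvPiece word, " "])
termination_by line.length + 1 - pos
decreasing_by
  obtain ⟨h1, h2⟩ := pv_findFrom_bounds line pos h
  omega

def obf_oneline_alt (line : String) : String := PySem.Str.join "" (pvGo line.toList 0 [])

-- ===== PRECONDITION & SPEC =====
def Spec_obf_oneline (line : String) (out : String) : Prop := out = obf_oneline_alt line
instance (line : String) (out : String) : Decidable (Spec_obf_oneline line out) := by unfold Spec_obf_oneline; infer_instance

-- ===== CLAIM (what is proved, stated in full; the proofs are below) =====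
def Claim_equal_obf_oneline : Prop := ∀ (line : String), Dom_obf_oneline line → Spec_obf_oneline line (obf_oneline line)

-- ===== LEMMAS AND PROOFS =====

lemma pv_intercalate_nil {α : Type} (xss : List (List α)) :
    List.intercalate [] xss = xss.flatten := by
  induction xss with
  | nil => simp [List.intercalate]
  | cons x xs ih => cases xs <;> simp_all [List.intercalate, List.intersperse]

lemma pv_join_cons (a : String) (l : List String) :
    PySem.Str.join "" (a :: l) = a ++ PySem.Str.join "" l := by
  simp [PySem.Str.join, PySem.Chars.join, pv_intercalate_nil, String.ofList_append]

lemma pv_join_nil : PySem.Str.join "" ([] : List String) = "" := by decide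

-- per-character agreement checked by computation for all code points below 128
set_option maxRecDepth 4000 in
lemma pv_perChar_small :
    (List.range 128).all (fun n => obfCharA (Char.ofNat n) == pvLookup (Char.ofNat n)) = true := by
  decide

set_option maxRecDepth 4000 in
lemma pv_keys_small : pvTable.keys.all (fun k => decide (k < 128)) = true := by decide

-- per-character agreement, for every character
set_option maxRecDepth 4000 in
lemma pv_perChar (c : Char) : obfCharA c = pvLookup c := by
  by_cases h : c.toNat < 128
  · have hb := List.all_eq_true.mp pv_perChar_small c.toNat (List.mem_range.mpr h)
    have := eq_of_beq hb
    rwa [Char.ofNat_toNat] at this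
  · -- code points ≥ 128 occur in none of the source strings: both sides return the char
    have hni : ∀ l : List Char, l.all (fun x => decide (x.toNat < 128)) = true →
        PySem.Chars.isIn [c] l = false := by
      intro l hl
      rw [PySem.Chars.isIn_eq_false_iff, List.singleton_infix_iff]
      intro hc; exact h (of_decide_eq_true (List.all_eq_true.mp hl c hc))
    have hget : pvTable.get? (c.toNat : Int) = none := by
      rw [PySem.Dict.get?_eq_none_iff_contains]
      rw [Bool.eq_false_iff]
      intro hcon
      have hk := List.all_eq_true.mp pv_keys_small _ ((PySem.Dict.contains_iff_mem_keys _ _).mp hcon)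
      have : (c.toNat : Int) < 128 := of_decide_eq_true hk
      omega
    have hP1 := hni "C:\\Program Files".toList (by decide)
    have hP2 := hni "C:\\Program Files (x86)".toList (by decide)
    have hPub := hni "C:\\Users\\Public".toList (by decide)
    have hW := hni "C:\\Program Files (x86)\\Common Files".toList (by decide)
    have hPs := hni "%ProgramFiles%\\WindowsPowerShell\\Modules;C:\\WINDOWS\\system32\\WindowsPowerShell\\v1.0\\Modules".toList (by decide)
    simp only [obfCharA]
    rw [hP1, hP2, hPub, hW, hPs]
    simp [pvLookup, hget]

-- A's inner char loop is pvTranslate, shifted by the accumulator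
lemma pv_wordEq : ∀ (l : List Char) (fs : String),
    l.foldl (fun fs char => fs ++ obfCharA char) fs = fs ++ pvTranslate l := by
  have gen : ∀ (l : List Char) (s : String),
      l.foldl (fun s c => s ++ pvLookup c) s = s ++ l.foldl (fun s c => s ++ pvLookup c) "" := by
    intro l
    induction l with
    | nil => intro s; simp
    | cons c rest ih =>
        intro s
        simp only [List.foldl_cons]
        rw [ih (s ++ pvLookup c), ih ("" ++ pvLookup c), String.empty_append,
          String.append_assoc]
  intro l fs
  have : ∀ (l : List Char) (fs : String),
      l.foldl (fun fs char => fs ++ obfCharA char) fs = l.foldl (fun s c => s ++ pvLookup c) fs := by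
    intro l
    induction l with
    | nil => intro fs; simp only [List.foldl_nil]
    | cons c rest ih => intro fs; simp only [List.foldl_cons, pv_perChar]
  rw [this, gen, pvTranslate]

-- one word of A's outer loop appends exactly pvPiece word ++ " "
lemma pv_headEq (w : List Char) (fs : String) :
    (if PySem.Chars.startswith w "%".toList then
        fs ++ String.ofList w ++ " "
      else if PySem.Chars.find w "%~".toList != -1 then
        fs ++ String.ofList w ++ " "
      else
        (w.foldl (fun fs char => fs ++ obfCharA char) fs) ++ " ")
    = fs ++ (pvPiece w ++ " ") := by
  unfold pvPiece
  cases h1 : PySem.Chars.startswith w "%".toList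
  · cases h2 : PySem.Chars.isIn "%~".toList w
    · have hfind : PySem.Chars.find w "%~".toList = -1 :=
        (PySem.Chars.find_eq_neg_one_iff _ _).mpr ((PySem.Chars.isIn_eq_false_iff _ _).mp h2)
      simp [pv_wordEq, String.append_assoc]
      intro hc; exact absurd hfind hc
    · have hfind : PySem.Chars.find w "%~".toList ≠ -1 :=
        (PySem.Chars.find_ne_neg_one_iff _ _).mpr ((PySem.Chars.isIn_iff_infix _ _).mp h2)
      simp [bne_iff_ne, String.append_assoc]
      intro hc; exact absurd hc hfind
  · simp [String.append_assoc]

-- A's outer foldl, as a join of per-word pieces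
lemma pv_topEq : ∀ (ws : List (List Char)) (fs : String),
    ws.foldl (fun final_string word =>
      if PySem.Chars.startswith word "%".toList then
        final_string ++ String.ofList word ++ " "
      else if PySem.Chars.find word "%~".toList != -1 then
        final_string ++ String.ofList word ++ " "
      else
        (word.foldl (fun fs char => fs ++ obfCharA char) final_string) ++ " ") fs
    = fs ++ PySem.Str.join "" (ws.map (fun w => pvPiece w ++ " ")) := by
  intro ws
  induction ws with
  | nil => intro fs; simp [pv_join_nil]
  | cons w rest ih =>
      intro fs
      simp only [List.foldl_cons, List.map_cons, pv_join_cons]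
      rw [ih, pv_headEq, String.append_assoc]

-- PySem's split on a single-char separator is Mathlib's splitOnP
lemma pv_go_splitOnP : ∀ (fuel : Nat) (l cur : List Char) (acc : List (List Char)),
    l.length ≤ fuel →
    PySem.Chars.splitOn.go [' '] fuel l cur acc
      = acc.reverse ++ List.modifyHead (cur.reverse ++ ·) (List.splitOnP (fun c => c == ' ') l) := by
  intro fuel
  induction fuel with
  | zero =>
      intro l cur acc hl
      have : l = [] := List.eq_nil_of_length_eq_zero (Nat.le_zero.mp hl)
      subst this
      simp [PySem.Chars.splitOn.go, List.splitOnP_nil]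
  | succ fuel ih =>
      intro l cur acc hl
      cases l with
      | nil => simp [PySem.Chars.splitOn.go, List.splitOnP_nil]
      | cons c rest =>
          rw [PySem.Chars.splitOn.go]
          by_cases hc : c = ' '
          · subst hc
            have hpre : [' '].isPrefixOf (' ' :: rest) = true := by simp [List.isPrefixOf]
            rw [hpre]
            simp only [List.length_cons] at hl
            rw [if_pos rfl, ih _ _ _ (by simpa using Nat.le_of_succ_le_succ hl)]
            simp only [List.splitOnP_cons, List.reverse_nil, List.nil_append, List.reverse_cons,
              List.append_assoc, List.singleton_append, if_pos (by rfl : ((' ' == ' ') = true))]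
            rw [show (fun x : List Char => x) = id from rfl, List.modifyHead_id]
            simp [List.modifyHead]
          · have hpre : [' '].isPrefixOf (c :: rest) = false := by
              simp [List.isPrefixOf]; exact fun he => hc he.symm
            rw [hpre]
            simp only [List.length_cons] at hl
            rw [if_neg (by simp), ih _ _ _ (Nat.le_of_succ_le_succ hl)]
            rw [List.splitOnP_cons]
            have hcb : ((c == ' ') = false) := by simp [hc]
            rw [hcb]
            simp only [Bool.false_eq_true, if_false]
            cases h : List.splitOnP (fun c => c == ' ') rest with
            | nil => simp
            | cons p ps => simp [List.modifyHead, List.reverse_cons, List.append_assoc]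

lemma pv_splitOn_eq (l : List Char) :
    PySem.Chars.splitOn l [' '] = List.splitOnP (fun c => c == ' ') l := by
  rw [PySem.Chars.splitOn, pv_go_splitOnP _ _ _ _ (by omega)]
  cases h : List.splitOnP (fun c => c == ' ') l with
  | nil => simp
  | cons p ps => simp [List.modifyHead]

-- splitOnP peels its first piece at the first occurrence of ' '
lemma pv_splitOnP_decomp (d : List Char) (hr : PySem.Chars.find d [' '] ≠ -1) :
    List.splitOnP (fun c => c == ' ') d
      = d.take (PySem.Chars.find d [' ']).toNat
        :: List.splitOnP (fun c => c == ' ') (d.drop ((PySem.Chars.find d [' ']).toNat + 1)) := by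
  have h0 : 0 ≤ PySem.Chars.find d [' '] :=
    (PySem.Chars.find_nonneg_iff _ _).mpr ((PySem.Chars.find_ne_neg_one_iff _ _).mp hr)
  obtain ⟨hpref, hmin⟩ := PySem.Chars.find_spec (s := d) (sub := [' ']) h0
  set rn := (PySem.Chars.find d [' ']).toNat with hrn
  have hdrop : d.drop rn = ' ' :: d.drop (rn + 1) := by
    obtain ⟨t, ht⟩ := hpref
    have htail : d.drop (rn + 1) = t := by
      have := congrArg List.tail ht.symm
      simpa [List.tail_drop] using this
    rw [htail, ← ht]; rfl
  have hd : d = d.take rn ++ ' ' :: d.drop (rn + 1) := by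
    conv_lhs => rw [← List.take_append_drop rn d]
    rw [hdrop]
  have htake : ∀ x ∈ d.take rn, ¬ ((x == ' ') = true) := by
    intro x hx hxs
    have hxe : x = ' ' := by simpa using hxs
    subst hxe
    obtain ⟨i, hi, hget⟩ := List.mem_iff_getElem.mp hx
    have hilt : i < rn := lt_of_lt_of_le hi (List.length_take_le rn d)
    have hidx : i < d.length := lt_of_lt_of_le hi (List.length_take_le' rn d)
    apply hmin i hilt
    refine ⟨d.drop (i + 1), ?_⟩
    rw [List.getElem_take] at hget
    calc [' '] ++ d.drop (i + 1) = d[i] :: d.drop (i + 1) := by rw [hget]; rfl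
      _ = d.drop i := List.getElem_cons_drop hidx
  calc List.splitOnP (fun c => c == ' ') d
      = List.splitOnP (fun c => c == ' ') (d.take rn ++ ' ' :: d.drop (rn + 1)) := by rw [← hd]
    _ = d.take rn :: List.splitOnP (fun c => c == ' ') (d.drop (rn + 1)) :=
        List.splitOnP_first (p := fun c => c == ' ') (xs := d.take rn) htake ' ' rfl _

-- Source B's scanner produces exactly the pieces of the split, each followed by " "
lemma pv_pvGo_fuel : ∀ (n : Nat) (l : List Char) (pos : Nat) (out : List String),
    l.length + 1 - pos ≤ n → pos ≤ l.length →
    pvGo l pos out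
      = out ++ (List.splitOnP (fun c => c == ' ') (l.drop pos)).flatMap (fun w => [pvPiece w, " "]) := by
  intro n
  induction n with
  | zero => intro l pos out hn hpos; omega
  | succ n ih =>
      intro l pos out hn hpos
      rw [pvGo]
      by_cases h : PySem.Chars.findFrom l [' '] (pos : Int) none < 0
      · simp only [dif_pos h, if_pos h]
        have hfind : PySem.Chars.find (l.drop pos) [' '] = -1 := by
          by_contra hne
          have h0 : 0 ≤ PySem.Chars.find (l.drop pos) [' '] :=
            (PySem.Chars.find_nonneg_iff _ _).mpr ((PySem.Chars.find_ne_neg_one_iff _ _).mp hne)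
          rw [PySem.Chars.findFrom_natCast _ _ _ hpos, if_neg hne] at h
          omega
        have hsingle : List.splitOnP (fun c => c == ' ') (l.drop pos) = [l.drop pos] := by
          apply List.splitOnP_eq_single
          intro x hx hxs
          have hxe : x = ' ' := by simpa using hxs
          subst hxe
          have : [' '] <:+: l.drop pos := by
            rw [← PySem.Chars.isIn_iff_infix]
            rw [← Bool.not_eq_false, PySem.Chars.isIn_eq_false_iff, List.singleton_infix_iff]
            simp [hx]
          exact (PySem.Chars.find_ne_neg_one_iff _ _).mpr this hfind
        rw [hsingle, PySem.List.slice_from_natCast]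
        simp
      · simp only [dif_neg h, if_neg h]
        have hne : PySem.Chars.find (l.drop pos) [' '] ≠ -1 := by
          intro he
          rw [PySem.Chars.findFrom_natCast _ _ _ hpos, if_pos he] at h
          exact h (by norm_num)
        have h0 : 0 ≤ PySem.Chars.find (l.drop pos) [' '] :=
          (PySem.Chars.find_nonneg_iff _ _).mpr ((PySem.Chars.find_ne_neg_one_iff _ _).mp hne)
        have hi : PySem.Chars.findFrom l [' '] (pos : Int) none
            = (pos : Int) + PySem.Chars.find (l.drop pos) [' '] := by
          rw [PySem.Chars.findFrom_natCast _ _ _ hpos, if_neg hne]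
        set rn := (PySem.Chars.find (l.drop pos) [' ']).toNat with hrn
        have hitn : (PySem.Chars.findFrom l [' '] (pos : Int) none).toNat = pos + rn := by omega
        have hilt : (PySem.Chars.findFrom l [' '] (pos : Int) none).toNat < l.length :=
          (pv_findFrom_bounds l pos h).2
        have hword : PySem.List.slice l (some (pos : Int))
            (some (PySem.Chars.findFrom l [' '] (pos : Int) none)) = (l.drop pos).take rn := by
          have hcast : PySem.Chars.findFrom l [' '] (pos : Int) none = ((pos + rn : Nat) : Int) := by
            omega
          rw [hcast, PySem.List.slice_natCast]
          congr 1
          omega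
        have hdecomp := pv_splitOnP_decomp (l.drop pos) hne
        rw [← hrn] at hdecomp
        have hdd : (l.drop pos).drop (rn + 1) = l.drop (pos + rn + 1) := by
          rw [List.drop_drop]
          congr 1
          try omega
        rw [hitn, hword, hdecomp, hdd, List.flatMap_cons]
        rw [ih l (pos + rn + 1) _ (by omega) (by omega)]
        simp [List.append_assoc]

lemma pv_pvGo_spec (l : List Char) (pos : Nat) (out : List String) (hpos : pos ≤ l.length) :
    pvGo l pos out
      = out ++ (List.splitOnP (fun c => c == ' ') (l.drop pos)).flatMap (fun w => [pvPiece w, " "]) :=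
  pv_pvGo_fuel (l.length + 1 - pos) l pos out le_rfl hpos

-- joining pairs [piece, " "] is joining the pieces each suffixed by " "
lemma pv_join_pairs : ∀ (ws : List (List Char)),
    PySem.Str.join "" (ws.flatMap (fun w => [pvPiece w, " "]))
      = PySem.Str.join "" (ws.map (fun w => pvPiece w ++ " ")) := by
  intro ws
  induction ws with
  | nil => rfl
  | cons w rest ih =>
      simp only [List.flatMap_cons, List.map_cons, List.cons_append, List.nil_append]
      rw [pv_join_cons, pv_join_cons, pv_join_cons, ih, String.append_assoc]

-- ===== VERDICT (by name: the statement is the Claim_ definition above) =====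
theorem obf_oneline_spec : Claim_equal_obf_oneline := by
  intro line _
  unfold Spec_obf_oneline obf_oneline obf_oneline_alt
  rw [pv_topEq, pv_pvGo_spec line.toList 0 [] (by omega)]
  rw [List.nil_append, List.drop_zero, pv_join_pairs]
  rw [show (" ".toList) = [' '] from rfl, pv_splitOn_eq, String.empty_append]
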